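-- pv_equiv track=rewrite | github.com/radAragon/algoritmo_transposicao | transposicao.py | texto_matriz
-- ===== SOURCE A (Python) =====
-- def texto_matriz(texto, num_colunas):
--     matriz = list('' for x in range(num_colunas))
--     y = 0
--     for c in texto:
--         if y == num_colunas:
--             y = 0
--         matriz[y] += c
--         y += 1
--     return matriz
-- ===== SOURCE B (Python) =====
-- def texto_matriz(texto, num_colunas):
--     return [texto[j::num_colunas] for j in range(num_colunas)]
-- ===== Notes on version B (the rewrite author's own statement) =====
-- stated objective: idiomatic
-- what changed: Replaces the sequential pass that appends each character to the next bucket with a wrapping counter by computing each column independently as the strided slice texto[j::num_colunas].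
import Mathlib
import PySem

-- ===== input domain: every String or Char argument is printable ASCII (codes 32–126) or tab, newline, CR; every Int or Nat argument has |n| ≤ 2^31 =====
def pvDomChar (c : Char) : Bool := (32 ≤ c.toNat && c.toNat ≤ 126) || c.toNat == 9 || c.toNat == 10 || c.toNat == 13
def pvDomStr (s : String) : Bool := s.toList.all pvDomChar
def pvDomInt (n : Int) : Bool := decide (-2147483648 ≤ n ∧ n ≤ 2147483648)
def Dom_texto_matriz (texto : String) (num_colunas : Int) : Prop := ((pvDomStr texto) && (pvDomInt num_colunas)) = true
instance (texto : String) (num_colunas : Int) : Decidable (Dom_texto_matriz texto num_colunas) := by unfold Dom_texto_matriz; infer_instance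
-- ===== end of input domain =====

-- B replaces A's sequential pass with a wrapping bucket counter by independent strided
-- slices texto[j::num_colunas] (idiomatic; same cost). Inputs where A raises IndexError
-- (num_colunas <= 0 with non-empty texto) are excluded by Pre_; B returns [] there.

-- ===== PORT A =====
-- matriz[y] += c is an in-range update under Pre_ (pyGetD/pySetD are the total forms;
-- Python's IndexError inputs are excluded by Pre_texto_matriz).
def texto_matriz (texto : String) (num_colunas : Int) : List String :=
  let matriz := (PySem.List.pyRange 0 num_colunas 1).map (fun _ => "")
  (texto.toList.foldl
    (fun (st : List String × Int) c =>
      let y := if st.2 = num_colunas then 0 else st.2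
      (PySem.List.pySetD st.1 y (PySem.List.pyGetD st.1 y "" ++ String.singleton c), y + 1))
    (matriz, 0)).1

-- ===== PORT B =====
-- [texto[j::num_colunas] for j in range(num_colunas)]; the slice never raises here
-- (j ranges over a non-empty range only when num_colunas > 0, so step ≠ 0), so .getD "" is never taken.
def texto_matriz_alt (texto : String) (num_colunas : Int) : List String :=
  (PySem.List.pyRange 0 num_colunas 1).map
    (fun j => (PySem.Str.slice? texto (some j) none num_colunas).getD "")

-- ===== PRECONDITION & SPEC =====
-- Pre_ excludes exactly the inputs where A raises IndexError: non-empty texto with num_colunas ≤ 0.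
def Pre_texto_matriz (texto : String) (num_colunas : Int) : Prop :=
  1 ≤ num_colunas ∨ texto = ""
instance (texto : String) (num_colunas : Int) : Decidable (Pre_texto_matriz texto num_colunas) := by
  unfold Pre_texto_matriz; infer_instance

def pvWitness_texto_matriz : String × Int := ("ab", 2)

def Spec_texto_matriz (texto : String) (num_colunas : Int) (out : List String) : Prop := out = texto_matriz_alt texto num_colunas
instance (texto : String) (num_colunas : Int) (out : List String) : Decidable (Spec_texto_matriz texto num_colunas out) := by unfold Spec_texto_matriz; infer_instance

-- ===== CLAIM (what is proved, stated in full; the proofs are below) =====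
def Claim_equal_texto_matriz : Prop := ∀ (texto : String) (num_colunas : Int), Dom_texto_matriz texto num_colunas → Pre_texto_matriz texto num_colunas → Spec_texto_matriz texto num_colunas (texto_matriz texto num_colunas)

-- ===== LEMMAS AND PROOFS =====

-- pvEvery l j N: the characters of l at positions j, j+N, j+2N, … (column j of the round-robin).
def pvEvery : List Char → Nat → Nat → List Char
  | [], _, _ => []
  | c :: l, 0, N => c :: pvEvery l (N - 1) N
  | _ :: l, j + 1, N => pvEvery l j N

-- pvCols l y N: the N columns the round-robin pass over l produces, starting at bucket y.
def pvCols : List Char → Nat → Nat → List (List Char)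
  | [], _, N => List.replicate N []
  | c :: l, y, N => (pvCols l ((y + 1) % N) N).modify y (c :: ·)

theorem pvEvery_zero (c : Char) (t : List Char) (N : Nat) :
    pvEvery (c :: t) 0 N = c :: pvEvery t (N - 1) N := rfl

theorem pvEvery_succ (c : Char) (t : List Char) (j N : Nat) :
    pvEvery (c :: t) (j + 1) N = pvEvery t j N := rfl

theorem pvEvery_eq_nil {l : List Char} {j N : Nat} (h : l.length ≤ j) : pvEvery l j N = [] := by
  induction l generalizing j with
  | nil => rfl
  | cons c t ih =>
    cases j with
    | zero => simp at h
    | succ j => exact ih (by simpa using h)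

theorem pvEvery_min (l : List Char) (j N : Nat) : pvEvery l (min j l.length) N = pvEvery l j N := by
  rcases le_total j l.length with h | h
  · rw [min_eq_left h]
  · rw [min_eq_right h, pvEvery_eq_nil le_rfl, pvEvery_eq_nil h]

theorem pvCols_length (l : List Char) (y N : Nat) : (pvCols l y N).length = N := by
  induction l generalizing y with
  | nil => simp [pvCols]
  | cons c t ih => simp [pvCols, ih]

theorem pvStride_filterMap (N : Nat) (hN : 0 < N) :
    ∀ (l : List Char) (j M : Nat), l.length ≤ j + N * M →
      List.filterMap (fun k => l[j + N * k]?) (List.range M) = pvEvery l j N := by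
  intro l
  induction l with
  | nil => intro j M _; simp [pvEvery]
  | cons c t ih =>
    intro j M hM
    cases j with
    | zero =>
      cases M with
      | zero => simp at hM
      | succ M =>
        rw [List.range_succ_eq_map, List.filterMap_cons, List.filterMap_map]
        have hfun : ((fun k => (c :: t)[0 + N * k]?) ∘ Nat.succ) = (fun k => t[(N - 1) + N * k]?) := by
          funext k
          have h1 : 0 + N * Nat.succ k = ((N - 1) + N * k) + 1 := by
            simp [Nat.mul_succ]; omega
          simp only [Function.comp]
          rw [h1, List.getElem?_cons_succ]
        simp only [hfun]
        rw [ih (N - 1) M (by simp [Nat.mul_succ] at hM ⊢; omega)]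
        rfl
    | succ j =>
      have hfun : (fun k => (c :: t)[(j + 1) + N * k]?) = (fun k => t[j + N * k]?) := by
        funext k
        have h1 : (j + 1) + N * k = (j + N * k) + 1 := by omega
        rw [h1, List.getElem?_cons_succ]
      rw [hfun, ih j M (by simp at hM; omega)]
      rfl

-- texto[j::N] (0 < N) is exactly column j of the round-robin.
theorem pvSlice_every (l : List Char) (j N : Nat) (hN : 0 < N) :
    PySem.List.slice? l (some (j : Int)) none (N : Int) = some (pvEvery l j N) := by
  have hN0 : (N : Int) ≠ 0 := by exact_mod_cast hN.ne'
  have hNneg : ¬ ((N : Int) < 0) := by omega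
  have hjneg : ¬ ((j : Int) < 0) := by omega
  simp only [PySem.List.slice?, PySem.List.sliceIndices, if_neg hN0, if_neg hNneg, if_neg hjneg]
  rw [if_pos (show (0:Int) < (N:Int) by exact_mod_cast hN)]
  rw [show min (↑j) ((l.length:Int)) = ((min j l.length : Nat) : Int) from (Nat.cast_min _ _).symm]
  set L := l.length with hL
  set s := min j L with hs
  have hfun : (fun x : Nat => l[((s:Int) + (N:Int) * (x:Int)).toNat]?) = (fun x : Nat => l[s + N * x]?) := by
    funext x
    rw [show ((s:Int) + (N:Int) * (x:Int)) = ((s + N * x : Nat) : Int) by push_cast; ring, Int.toNat_natCast]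
  split_ifs with hlt
  · set q := (((L:Int) - s + N - 1) / N) with hq
    have hq0 : 0 ≤ q := Int.ediv_nonneg (by omega) (by omega)
    have hdm := Int.mul_ediv_add_emod ((L:Int) - s + N - 1) N
    have hr0 : 0 ≤ ((L:Int) - s + N - 1) % N := Int.emod_nonneg _ hN0
    have hr1 : ((L:Int) - s + N - 1) % N < N := Int.emod_lt_of_pos _ (by omega)
    have hbound : (L:Int) ≤ s + N * q := by
      have : (N:Int) * q = (L:Int) - s + N - 1 - ((L:Int) - s + N - 1) % N := by linarith
      linarith
    have hboundN : L ≤ s + N * q.toNat := by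
      have hcast : ((s + N * q.toNat : Nat) : Int) = s + N * q := by
        push_cast [Int.toNat_of_nonneg hq0]; ring
      exact_mod_cast hcast ▸ hbound
    rw [hfun, pvStride_filterMap N hN l s q.toNat hboundN, pvEvery_min]
  · have hsL : s = L := le_antisymm (min_le_right _ _) (by exact_mod_cast not_lt.mp hlt)
    rw [hfun, pvStride_filterMap N hN l s 0 (by omega), pvEvery_min]

theorem pvCols_getElem (N : Nat) (hN : 0 < N) :
    ∀ (l : List Char) (y j : Nat), y < N → (hj : j < N) →
      (pvCols l y N)[j]'(by rw [pvCols_length]; exact hj) = pvEvery l ((j + N - y) % N) N := by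
  intro l
  induction l with
  | nil => intro y j hy hj; simp [pvCols, pvEvery]
  | cons c t ih =>
    intro y j hy hj
    have hlen : j < (pvCols t ((y + 1) % N) N).length := by rw [pvCols_length]; exact hj
    simp only [pvCols, List.getElem_modify]
    by_cases hyj : y = j
    · subst hyj
      rw [if_pos rfl]
      have h0 : (y + N - y) % N = 0 := by
        have : y + N - y = N := by omega
        rw [this, Nat.mod_self]
      rw [h0, pvEvery_zero, ih ((y + 1) % N) y (Nat.mod_lt _ hN) hy]
      by_cases hyN : y + 1 < N
      · rw [Nat.mod_eq_of_lt hyN]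
        congr 1
        have : y + N - (y + 1) = N - 1 := by omega
        rw [this, Nat.mod_eq_of_lt (by omega)]
      · have hy1 : y + 1 = N := by omega
        rw [hy1, Nat.mod_self]
        congr 1
        have : y + N - 0 = (N - 1) + N := by omega
        rw [this, Nat.add_mod_right, Nat.mod_eq_of_lt (by omega)]
    · rw [if_neg hyj]
      rw [ih ((y + 1) % N) j (Nat.mod_lt _ hN) hj]
      by_cases hcase : y < j
      · have ho : (j + N - y) % N = j - y := by
          have h1 : j + N - y = (j - y) + N := by omega
          rw [h1, Nat.add_mod_right, Nat.mod_eq_of_lt (by omega)]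
        rw [ho]
        have hjy : j - y = (j - y - 1) + 1 := by omega
        rw [hjy, pvEvery_succ]
        by_cases hyN : y + 1 < N
        · rw [Nat.mod_eq_of_lt hyN]
          congr 1
          have : j + N - (y + 1) = (j - y - 1) + N := by omega
          rw [this, Nat.add_mod_right, Nat.mod_eq_of_lt (by omega)]
        · omega
      · have hjy : j < y := by omega
        have ho : (j + N - y) % N = j + N - y := Nat.mod_eq_of_lt (by omega)
        rw [ho]
        have h2 : j + N - y = (j + N - y - 1) + 1 := by omega
        rw [h2, pvEvery_succ]
        by_cases hyN : y + 1 < N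
        · rw [Nat.mod_eq_of_lt hyN]
          congr 1
          have : j + N - (y + 1) = j + N - y - 1 := by omega
          rw [this, Nat.mod_eq_of_lt (by omega)]
        · have hy1 : y + 1 = N := by omega
          rw [hy1, Nat.mod_self]
          congr 1
          have : j + N - 0 = j + N := by omega
          rw [this, Nat.add_mod_right, Nat.mod_eq_of_lt (by omega)]
          omega

theorem pvStr_assoc (s : String) (c : Char) (cs : List Char) :
    s ++ String.ofList (c :: cs) = (s ++ String.singleton c) ++ String.ofList cs := by
  rw [← String.toList_inj]; simp

theorem pvZip_rep (m : List String) :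
    List.zipWith (fun s cs => s ++ String.ofList cs) m (List.replicate m.length []) = m := by
  induction m with
  | nil => rfl
  | cons s t ih =>
    simp only [List.length_cons, List.replicate_succ, List.zipWith_cons_cons, ih]
    congr 1
    rw [← String.toList_inj]; simp

theorem pvZip_set (m : List String) (cols : List (List Char)) (j : Nat) (c : Char)
    (hj : j < m.length) (hlen : cols.length = m.length) :
    List.zipWith (fun s cs => s ++ String.ofList cs) (m.set j (m[j] ++ String.singleton c)) cols
      = List.zipWith (fun s cs => s ++ String.ofList cs) m (cols.modify j (c :: ·)) := by
  apply List.ext_getElem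
  · simp [hlen]
  · intro i h1 h2
    simp only [List.getElem_zipWith, List.getElem_set, List.getElem_modify]
    by_cases hij : j = i
    · subst hij; simp [pvStr_assoc]
    · simp [hij]

theorem pvFold_inv (N : Nat) (hN : 0 < N) (l : List Char) :
    ∀ (m : List String) (y : Nat), m.length = N → y ≤ N →
      (l.foldl
        (fun (st : List String × Int) c =>
          let y := if st.2 = (N : Int) then 0 else st.2
          (PySem.List.pySetD st.1 y (PySem.List.pyGetD st.1 y "" ++ String.singleton c), y + 1))
        (m, (y : Int))).1
      = List.zipWith (fun s cs => s ++ String.ofList cs) m (pvCols l (y % N) N) := by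
  induction l with
  | nil =>
    intro m y hm _
    show m = _
    rw [show pvCols [] (y % N) N = List.replicate N [] from rfl, ← hm, pvZip_rep]
  | cons c t ih =>
    intro m y hm hy
    have hy2 : y % N < N := Nat.mod_lt _ hN
    have hyc : (if ((y : Int)) = (N : Int) then (0 : Int) else (y : Int)) = ((y % N : Nat) : Int) := by
      by_cases h : y = N
      · subst h; simp [Nat.mod_self]
      · rw [if_neg (by exact_mod_cast h), Nat.mod_eq_of_lt (by omega)]
    have hj : y % N < m.length := by omega
    simp only [List.foldl_cons, hyc, PySem.List.pySetD_natCast, PySem.List.pyGetD_natCast]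
    rw [List.getD_eq_getElem m "" hj]
    rw [show ((y % N : Nat) : Int) + 1 = ((y % N + 1 : Nat) : Int) by push_cast; ring]
    rw [ih (m.set (y % N) (m[y % N] ++ String.singleton c)) (y % N + 1) (by simpa using hm) (by omega)]
    rw [pvZip_set m _ (y % N) c hj (by rw [pvCols_length]; omega)]
    rw [show (pvCols t ((y % N + 1) % N) N).modify (y % N) (c :: ·) = pvCols (c :: t) (y % N) N from rfl]

theorem pvZip_empty (cols : List (List Char)) (L : List Int) (h : cols.length = L.length) :
    List.zipWith (fun s cs => s ++ String.ofList cs) (L.map (fun _ => "")) cols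
      = cols.map String.ofList := by
  induction L generalizing cols with
  | nil => cases cols with
    | nil => rfl
    | cons c cs => simp at h
  | cons a L ih =>
    cases cols with
    | nil => simp at h
    | cons c cs =>
      simp only [List.map_cons, List.zipWith_cons_cons, ih cs (by simpa using h)]
      congr 1

-- ===== VERDICT (by name: the statement is the Claim_ definition above) =====
theorem texto_matriz_spec : Claim_equal_texto_matriz := by
  intro texto n _ hpre
  unfold Spec_texto_matriz
  by_cases h1 : 1 ≤ n
  · set N := n.toNat with hNdef
    have hNn : ((N : Nat) : Int) = n := Int.toNat_of_nonneg (by omega)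
    have hN : 0 < N := by omega
    set l := texto.toList with hl
    rw [← hNn]
    unfold texto_matriz texto_matriz_alt
    have hm : ((PySem.List.pyRange 0 ((N : Nat) : Int) 1).map (fun _ => ("" : String))).length = N := by
      simp [PySem.List.length_pyRange_one]
    have H := pvFold_inv N hN l ((PySem.List.pyRange 0 ((N : Nat) : Int) 1).map (fun _ => ("" : String))) 0 hm (by omega)
    simp only [Nat.cast_zero, Nat.zero_mod] at H
    rw [H, pvZip_empty _ _ (by simp [pvCols_length, PySem.List.length_pyRange_one])]
    apply List.ext_getElem
    · simp [pvCols_length, PySem.List.length_pyRange_one]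
    · intro k hk1 hk2
      simp only [List.getElem_map, PySem.List.getElem_pyRange_one]
      have hkN : k < N := by simpa [pvCols_length] using hk1
      rw [pvCols_getElem N hN l 0 k hN hkN]
      have hidx : (k + N - 0) % N = k := by
        have : k + N - 0 = k + N := by omega
        rw [this, Nat.add_mod_right, Nat.mod_eq_of_lt hkN]
      rw [hidx]
      show _ = (PySem.Str.slice? texto (some (0 + (k : Int))) none ((N : Nat) : Int)).getD ""
      rw [show (0 + (k : Int)) = ((k : Nat) : Int) by ring]
      rw [show PySem.Str.slice? texto (some ((k : Nat) : Int)) none ((N : Nat) : Int)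
            = Option.map String.ofList (PySem.List.slice? l (some ((k : Nat) : Int)) none ((N : Nat) : Int)) from rfl]
      rw [pvSlice_every l k N hN]
      rfl
  · have ht : texto = "" := hpre.resolve_left h1
    subst ht
    have hr : PySem.List.pyRange 0 n 1 = [] := PySem.List.pyRange_one_eq_nil (by omega)
    simp [texto_matriz, texto_matriz_alt, hr]
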